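-- pv_equiv track=rewrite | github.com/felipe-delmondes/FiOWAT-Ferramenta-cinco-em-um-para-Calculo-de-WCET | src/ga/dynamic_ga.py | filter_output_wpevt
-- ===== SOURCE A (Python) =====
-- def filter_output_wpevt(output: list) -> dict:
--     '''
--     Function to bond the output of path block and create a vector for comparision
--
--
--     Parameters
--     ----------
--     output : list
--         Response of board/simulator
--
--
--     Returns
--     -------
--     path_blocks : dict
--         Basic block path
--     '''
--     path_blocks = {}
--     for line in output:
--         if line and line[:2] == "#;":
--             _, func, block = line.split(";")
--             if func not in path_blocks:
--                 path_blocks[func] = {}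
--             if block not in path_blocks[func]:
--                 path_blocks[func][block] = 1
--             else:
--                 path_blocks[func][block] += 1
--     return path_blocks
-- ===== SOURCE B (Python) =====
-- def filter_output_wpevt(output: list) -> dict:
--     '''Declarative re-implementation: extract the (func, block) pairs once, then
--     build the nested dict by ordered dedup + counting instead of incremental
--     nested-dict mutation.  Malformed "#;" lines (not exactly 3 fields) are
--     skipped; A raises ValueError there (outside Pre_).'''
--     pairs = [(p[1], p[2])
--              for p in (line.split(";") for line in output if line[:2] == "#;")
--              if len(p) == 3]
--     return {func: {block: pairs.count((func, block))
--                    for block in dict.fromkeys(b for f, b in pairs if f == func)}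
--             for func in dict.fromkeys(f for f, _ in pairs)}
-- ===== Notes on version B (the rewrite author's own statement) =====
-- stated objective: alternative
-- what changed: Replaces A's single pass of incremental nested-dict mutation (membership tests plus in-place counter updates) by a declarative two-phase decomposition: extract the (func, block) pairs once, then build the nested dict by ordered dedup of keys and counting occurrences per pair.
import Mathlib
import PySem

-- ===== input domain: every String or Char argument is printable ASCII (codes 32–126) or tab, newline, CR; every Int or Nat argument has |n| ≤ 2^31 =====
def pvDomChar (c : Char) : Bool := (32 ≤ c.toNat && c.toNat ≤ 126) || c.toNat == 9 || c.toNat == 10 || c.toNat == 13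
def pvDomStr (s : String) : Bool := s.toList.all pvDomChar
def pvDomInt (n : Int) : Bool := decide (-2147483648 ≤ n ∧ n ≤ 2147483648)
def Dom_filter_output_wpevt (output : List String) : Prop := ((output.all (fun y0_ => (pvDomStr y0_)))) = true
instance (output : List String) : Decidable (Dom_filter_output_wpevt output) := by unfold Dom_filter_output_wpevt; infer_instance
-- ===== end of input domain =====

-- B replaces A's single pass with incremental nested-dict mutation by a declarative
-- decomposition: extract the (func, block) pairs once, then build the nested result by
-- ordered dedup + counting (objective: alternative; return value only, A mutates nothing).

-- ===== PORT A =====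
def filter_output_wpevt (output : List String) : List (String × List (String × Int)) :=
  (output.foldl
    (fun (pb : PySem.Dict String (PySem.Dict String Int)) line =>
      if (line != "") && (PySem.Str.slice line none (some 2) == "#;") then
        match PySem.Str.split? line ";" with
        | some [_, func, block] =>
          let pb1 := if pb.contains func then pb else pb.insert func PySem.Dict.empty
          let inner := pb1.getD func PySem.Dict.empty
          if inner.contains block then
            pb1.insert func (inner.insert block (inner.getD block 0 + 1))
          else
            pb1.insert func (inner.insert block 1)
        | _ => pb   -- Python: ValueError (unpack arity); excluded by Pre_
      else pb)
    PySem.Dict.empty).items.map (fun p => (p.1, p.2.items))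

-- ===== PORT B =====
def filter_output_wpevt_alt (output : List String) : List (String × List (String × Int)) :=
  let pairs : List (String × String) := output.flatMap (fun line =>
    if PySem.Str.slice line none (some 2) == "#;" then
      match PySem.Str.split? line ";" with
      | none => []
      | some parts => if parts.length == 3 then [(parts[1]!, parts[2]!)] else []
    else [])
  (PySem.List.dedup (pairs.map Prod.fst)).map (fun func =>
    (func,
      (PySem.List.dedup ((pairs.filter (fun q => q.1 == func)).map Prod.snd)).map
        (fun block => (block, (pairs.count (func, block) : Int)))))

-- ===== PRECONDITION & SPEC =====
-- Pre_ excludes exactly the inputs on which Python A raises ValueError: a line starting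
-- with "#;" whose split on ";" does not have exactly three fields (i.e. not exactly 2 ';').
def Pre_filter_output_wpevt (output : List String) : Prop :=
  ∀ line ∈ output, PySem.Str.startswith line "#;" = true → PySem.Str.count line ";" = 2
instance (output : List String) : Decidable (Pre_filter_output_wpevt output) := by
  unfold Pre_filter_output_wpevt; infer_instance
def pvWitness_filter_output_wpevt : List String :=
  ["#;main;b1", "#;main;b1", "noise", "#;main;b2", "#;g;b1"]

def Spec_filter_output_wpevt (output : List String) (out : List (String × List (String × Int))) : Prop := out = filter_output_wpevt_alt output
instance (output : List String) (out : List (String × List (String × Int))) : Decidable (Spec_filter_output_wpevt output out) := by unfold Spec_filter_output_wpevt; infer_instance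

-- ===== CLAIM (what is proved, stated in full; the proofs are below) =====
def Claim_equal_filter_output_wpevt : Prop := ∀ (output : List String), Dom_filter_output_wpevt output → Pre_filter_output_wpevt output → Spec_filter_output_wpevt output (filter_output_wpevt output)

-- ===== LEMMAS AND PROOFS =====

def pvPairs (output : List String) : List (String × String) :=
  output.flatMap (fun line =>
    if PySem.Str.slice line none (some 2) == "#;" then
      match PySem.Str.split? line ";" with
      | none => []
      | some parts => if parts.length == 3 then [(parts[1]!, parts[2]!)] else []
    else [])

def pvStep (pb : PySem.Dict String (PySem.Dict String Int)) (p : String × String) :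
    PySem.Dict String (PySem.Dict String Int) :=
  pb.insert p.1 ((pb.getD p.1 PySem.Dict.empty).insert p.2
    ((pb.getD p.1 PySem.Dict.empty).getD p.2 0 + 1))

def pvInner (f : String) (ps : List (String × String)) : List (String × Int) :=
  (PySem.List.dedup ((ps.filter (fun q => q.1 == f)).map Prod.snd)).map
    (fun block => (block, (ps.count (f, block) : Int)))

def pvCanonD (ps : List (String × String)) : List (String × PySem.Dict String Int) :=
  (PySem.List.dedup (ps.map Prod.fst)).map (fun f => (f, PySem.Dict.mk (pvInner f ps)))

lemma pv_cond_eq (line : String) :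
    ((line != "") && (PySem.Str.slice line none (some 2) == "#;"))
      = (PySem.Str.slice line none (some 2) == "#;") := by
  by_cases h : line = ""
  · subst h; decide
  · simp [h]

lemma pv_stepA_eq (d : PySem.Dict String (PySem.Dict String Int)) (f b : String) :
    (let pb1 := if d.contains f then d else d.insert f PySem.Dict.empty
     let inner := pb1.getD f PySem.Dict.empty
     if inner.contains b then
       pb1.insert f (inner.insert b (inner.getD b 0 + 1))
     else
       pb1.insert f (inner.insert b 1)) = pvStep d (f, b) := by
  by_cases hc : d.contains f
  · simp only [hc, if_true, pvStep]
    by_cases hb : (d.getD f PySem.Dict.empty).contains b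
    · simp [hb]
    · simp [hb, PySem.Dict.getD_of_not_contains _ _ (by simpa using hb)]
  · simp only [hc, if_false, Bool.false_eq_true, pvStep]
    have h1 : (d.insert f PySem.Dict.empty).getD f PySem.Dict.empty = PySem.Dict.empty :=
      PySem.Dict.getD_insert_self _ _ _ _
    have h2 : d.getD f PySem.Dict.empty = PySem.Dict.empty :=
      PySem.Dict.getD_of_not_contains _ _ (by simpa using hc)
    simp [h1, h2, PySem.Dict.insert_insert_self, PySem.Dict.getD_empty, PySem.Dict.contains_empty]

lemma pv_len4 (n : Nat) : (n + 1 + 1 + 1 + 1 == 3) = false := by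
  simp only [beq_eq_false_iff_ne, ne_eq]
  omega

lemma pv_fold_lines (output : List String) (d : PySem.Dict String (PySem.Dict String Int)) :
    output.foldl
      (fun (pb : PySem.Dict String (PySem.Dict String Int)) line =>
        if (line != "") && (PySem.Str.slice line none (some 2) == "#;") then
          match PySem.Str.split? line ";" with
          | some [_, func, block] =>
            let pb1 := if pb.contains func then pb else pb.insert func PySem.Dict.empty
            let inner := pb1.getD func PySem.Dict.empty
            if inner.contains block then
              pb1.insert func (inner.insert block (inner.getD block 0 + 1))
            else
              pb1.insert func (inner.insert block 1)
          | _ => pb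
        else pb) d
      = (pvPairs output).foldl pvStep d := by
  induction output generalizing d with
  | nil => rfl
  | cons line rest ih =>
    rw [List.foldl_cons]
    have hpp : pvPairs (line :: rest)
        = (if PySem.Str.slice line none (some 2) == "#;" then
            match PySem.Str.split? line ";" with
            | none => []
            | some parts => if parts.length == 3 then [(parts[1]!, parts[2]!)] else []
          else []) ++ pvPairs rest := by
      simp [pvPairs]
    rw [hpp, List.foldl_append, pv_cond_eq]
    by_cases hc : (PySem.Str.slice line none (some 2) == "#;") = true
    · rw [if_pos hc, if_pos hc]
      rcases hsp : PySem.Str.split? line ";" with _ | ⟨_ | ⟨a, _ | ⟨f, _ | ⟨b, _ | rest2⟩⟩⟩⟩ <;>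
        (try simp only [List.length_cons, List.length_nil, List.getElem!_cons_succ,
            List.getElem!_cons_zero]
         try simp only [show ((0 : Nat) == 3) = false from rfl, show ((1 : Nat) == 3) = false from rfl,
           show ((2 : Nat) == 3) = false from rfl, show ((3 : Nat) == 3) = true from rfl,
           pv_len4, if_true, if_false, Bool.false_eq_true, List.foldl_cons, List.foldl_nil]) <;>
        rw [ih] <;> try rw [pv_stepA_eq]
    · rw [if_neg hc, if_neg hc]
      simp only [List.foldl_nil]
      exact ih d

lemma pv_keys_of_items (d : PySem.Dict String (PySem.Dict String Int))
    (ps : List (String × String)) (h : d.items = pvCanonD ps) :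
    d.keys = PySem.List.dedup (ps.map Prod.fst) := by
  simp only [PySem.Dict.keys, h, pvCanonD, List.map_map]
  rw [show ((fun (x : String × PySem.Dict String Int) => x.1) ∘ fun f => (f, PySem.Dict.mk (pvInner f ps))) = id from funext fun _ => rfl, List.map_id]

lemma pv_getD_of_items (d : PySem.Dict String (PySem.Dict String Int))
    (ps : List (String × String)) (h : d.items = pvCanonD ps) (f : String) :
    d.getD f PySem.Dict.empty = PySem.Dict.mk (pvInner f ps) := by
  have hk := pv_keys_of_items d ps h
  have hnd : d.keys.Nodup := by
    rw [hk]; simpa using PySem.Set.nodup_ofList (ps.map Prod.fst)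
  by_cases hm : f ∈ PySem.List.dedup (ps.map Prod.fst)
  · have hmem : (f, PySem.Dict.mk (pvInner f ps)) ∈ d.items := by
      rw [h, pvCanonD]; exact List.mem_map.mpr ⟨f, hm, rfl⟩
    exact PySem.Dict.getD_of_mem_items d hmem hnd _
  · have hcf : d.contains f = false := by
      by_contra hcc
      have : d.contains f = true := by simpa using hcc
      have : f ∈ d.keys := (PySem.Dict.contains_iff_mem_keys d f).mp this
      rw [hk] at this; exact hm this
    have h0 : pvInner f ps = [] := by
      have hfil : ps.filter (fun q => q.1 == f) = [] := by
        rw [List.filter_eq_nil_iff]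
        intro q hq hqf
        have : f ∈ ps.map Prod.fst := List.mem_map.mpr ⟨q, hq, by simpa using hqf⟩
        exact hm (by simpa [PySem.List.dedup_eq_ofList] using (PySem.Set.mem_ofList _ f).mpr this)
      simp [pvInner, hfil]
    rw [PySem.Dict.getD_of_not_contains d _ hcf, h0]
    rfl

lemma pv_inner_keys (f : String) (ps : List (String × String)) :
    (PySem.Dict.mk (pvInner f ps)).keys
      = PySem.List.dedup ((ps.filter (fun q => q.1 == f)).map Prod.snd) := by
  simp only [PySem.Dict.keys, pvInner, List.map_map]
  rw [show ((fun (x : String × Int) => x.1) ∘ fun block => (block, (ps.count (f, block) : Int))) = id from funext fun _ => rfl, List.map_id]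

lemma pv_inner_getD (f b : String) (ps : List (String × String)) :
    (PySem.Dict.mk (pvInner f ps)).getD b 0 = (ps.count (f, b) : Int) := by
  have hk := pv_inner_keys f ps
  have hnd : (PySem.Dict.mk (pvInner f ps)).keys.Nodup := by
    rw [hk]; simpa using PySem.Set.nodup_ofList _
  by_cases hm : b ∈ PySem.List.dedup ((ps.filter (fun q => q.1 == f)).map Prod.snd)
  · have hmem : (b, (ps.count (f, b) : Int)) ∈ (PySem.Dict.mk (pvInner f ps)).items := by
      show _ ∈ pvInner f ps
      exact List.mem_map.mpr ⟨b, hm, rfl⟩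
    exact PySem.Dict.getD_of_mem_items _ hmem hnd _
  · have hcf : (PySem.Dict.mk (pvInner f ps)).contains b = false := by
      by_contra hcc
      have : (PySem.Dict.mk (pvInner f ps)).contains b = true := by simpa using hcc
      have := (PySem.Dict.contains_iff_mem_keys _ b).mp this
      rw [hk] at this; exact hm this
    have hc0 : ps.count (f, b) = 0 := by
      rw [List.count_eq_zero]
      intro hin
      apply hm
      have : b ∈ (ps.filter (fun q => q.1 == f)).map Prod.snd :=
        List.mem_map.mpr ⟨(f, b), List.mem_filter.mpr ⟨hin, by simp⟩, rfl⟩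
      simpa [PySem.List.dedup_eq_ofList, PySem.Set.mem_ofList] using this
    rw [PySem.Dict.getD_of_not_contains _ _ hcf, hc0]
    simp

lemma pv_count_append_pair (ps : List (String × String)) (f b block : String) :
    ((ps ++ [(f, b)]).count (f, block) : Int)
      = (ps.count (f, block) : Int) + (if block = b then 1 else 0) := by
  rw [List.count_append]
  by_cases hbb : block = b
  · subst hbb; simp
  · have : ((f, b) = (f, block)) = False := by simp [Prod.ext_iff, Ne.symm hbb]
    simp [List.count_singleton, this, hbb]

lemma pv_inner_ne (f f' : String) (b : String) (ps : List (String × String)) (hne : f' ≠ f) :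
    pvInner f' (ps ++ [(f, b)]) = pvInner f' ps := by
  have hb : ((f, b).1 == f') = false := by simpa using (Ne.symm hne)
  have hcnt : ∀ block : String, ((f, b) = (f', block)) = False := by
    intro block; simp [Prod.ext_iff, Ne.symm hne]
  simp [pvInner, List.filter_append, List.count_append, hb, hcnt, List.count_singleton]

lemma pv_inner_update (f b : String) (ps : List (String × String)) :
    (PySem.Dict.mk (pvInner f ps)).insert b ((ps.count (f, b) : Int) + 1)
      = PySem.Dict.mk (pvInner f (ps ++ [(f, b)])) := by
  apply PySem.Dict.ext
  have hfil : (ps ++ [(f, b)]).filter (fun q => q.1 == f) = ps.filter (fun q => q.1 == f) ++ [(f, b)] := by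
    simp [List.filter_append]
  have hmapsnd : ((ps ++ [(f, b)]).filter (fun q => q.1 == f)).map Prod.snd
      = (ps.filter (fun q => q.1 == f)).map Prod.snd ++ [b] := by
    rw [hfil]; simp
  set M := (ps.filter (fun q => q.1 == f)).map Prod.snd with hM
  have hk := pv_inner_keys f ps
  by_cases hm : b ∈ PySem.List.dedup M
  · -- overwrite in place
    have hc : (PySem.Dict.mk (pvInner f ps)).contains b = true := by
      rw [PySem.Dict.contains_iff_mem_keys, hk]; exact hm
    rw [PySem.Dict.items_insert_of_contains _ _ hc]
    have hded : PySem.List.dedup (M ++ [b]) = PySem.List.dedup M := by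
      simp only [PySem.List.dedup_eq_ofList, PySem.Set.ofList_append_singleton,
        PySem.Set.add_eq_ite]
      rw [if_pos]
      simpa [PySem.List.dedup_eq_ofList] using hm
    show (pvInner f ps).map _ = pvInner f (ps ++ [(f, b)])
    rw [pvInner, pvInner, hmapsnd, hded, ← hM, List.map_map]
    apply List.map_congr_left
    intro block hbl
    by_cases hbb : block = b
    · subst hbb
      simp [pv_count_append_pair]
    · have hne2 : (f, block) ≠ (f, b) := by simp [Prod.ext_iff, hbb]
      have hcz : List.count (f, block) [(f, b)] = 0 :=
        List.count_eq_zero.mpr (fun hmem => hne2 (List.mem_singleton.mp hmem))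
      simp [Function.comp, hbb, hcz, pv_count_append_pair ps f b block]
  · -- fresh key: append
    have hc : (PySem.Dict.mk (pvInner f ps)).contains b = false := by
      by_contra hcc
      have : (PySem.Dict.mk (pvInner f ps)).contains b = true := by simpa using hcc
      rw [PySem.Dict.contains_iff_mem_keys, hk] at this
      exact hm this
    rw [PySem.Dict.items_insert_of_not_contains _ _ hc]
    have hded : PySem.List.dedup (M ++ [b]) = PySem.List.dedup M ++ [b] := by
      simp only [PySem.List.dedup_eq_ofList, PySem.Set.ofList_append_singleton,
        PySem.Set.add_eq_ite]
      rw [if_neg]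
      simpa [PySem.List.dedup_eq_ofList] using hm
    show pvInner f ps ++ [(b, (ps.count (f, b) : Int) + 1)] = pvInner f (ps ++ [(f, b)])
    rw [pvInner, pvInner, hmapsnd, hded, ← hM, List.map_append]
    congr 1
    · apply List.map_congr_left
      intro block hbl
      have hbb : block ≠ b := by
        intro hcon; subst hcon; exact hm hbl
      have hne2 : (f, block) ≠ (f, b) := by simp [Prod.ext_iff, hbb]
      have hcz : List.count (f, block) [(f, b)] = 0 :=
        List.count_eq_zero.mpr (fun hmem => hne2 (List.mem_singleton.mp hmem))
      simp [hbb, hcz, pv_count_append_pair ps f b block]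
    · simp [pv_count_append_pair ps f b b]

lemma pv_main (ps : List (String × String)) :
    (ps.foldl pvStep PySem.Dict.empty).items = pvCanonD ps := by
  induction ps using List.reverseRecOn with
  | nil => simp [pvCanonD, PySem.List.dedup_eq_ofList, PySem.Set.ofList_nil]; rfl
  | append_singleton ps p ih =>
    obtain ⟨f, b⟩ := p
    rw [List.foldl_append, List.foldl_cons, List.foldl_nil]
    set d := ps.foldl pvStep PySem.Dict.empty with hd
    have hin : d.getD f PySem.Dict.empty = PySem.Dict.mk (pvInner f ps) :=
      pv_getD_of_items d ps ih f
    show (d.insert f ((d.getD f PySem.Dict.empty).insert b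
        ((d.getD f PySem.Dict.empty).getD b 0 + 1))).items = pvCanonD (ps ++ [(f, b)])
    rw [hin, pv_inner_getD f b ps, pv_inner_update]
    have hmf : ((ps ++ [(f, b)]).map Prod.fst) = ps.map Prod.fst ++ [f] := by simp
    by_cases hm : f ∈ PySem.List.dedup (ps.map Prod.fst)
    · have hc : d.contains f = true := by
        rw [PySem.Dict.contains_iff_mem_keys, pv_keys_of_items d ps ih]; exact hm
      rw [PySem.Dict.items_insert_of_contains _ _ hc, ih]
      have hded : PySem.List.dedup ((ps ++ [(f, b)]).map Prod.fst)
          = PySem.List.dedup (ps.map Prod.fst) := by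
        rw [hmf]
        simp only [PySem.List.dedup_eq_ofList, PySem.Set.ofList_append_singleton,
          PySem.Set.add_eq_ite]
        rw [if_pos]
        simpa [PySem.List.dedup_eq_ofList] using hm
      rw [pvCanonD, pvCanonD, hded, List.map_map]
      apply List.map_congr_left
      intro f' hf'
      by_cases hff : f' = f
      · subst hff; simp
      · simp [Function.comp, hff, pv_inner_ne f f' b ps hff]
    · have hc : d.contains f = false := by
        by_contra hcc
        have : d.contains f = true := by simpa using hcc
        rw [PySem.Dict.contains_iff_mem_keys, pv_keys_of_items d ps ih] at this
        exact hm this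
      rw [PySem.Dict.items_insert_of_not_contains _ _ hc, ih]
      have hded : PySem.List.dedup ((ps ++ [(f, b)]).map Prod.fst)
          = PySem.List.dedup (ps.map Prod.fst) ++ [f] := by
        rw [hmf]
        simp only [PySem.List.dedup_eq_ofList, PySem.Set.ofList_append_singleton,
          PySem.Set.add_eq_ite]
        rw [if_neg]
        simpa [PySem.List.dedup_eq_ofList] using hm
      rw [pvCanonD, pvCanonD, hded, List.map_append]
      congr 1
      · apply List.map_congr_left
        intro f' hf'
        have hff : f' ≠ f := by
          intro hcon; subst hcon; exact hm hf'
        simp [pv_inner_ne f f' b ps hff]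

theorem pv_equal (output : List String) :
    filter_output_wpevt output = filter_output_wpevt_alt output := by
  have hA : filter_output_wpevt output
      = ((pvPairs output).foldl pvStep PySem.Dict.empty).items.map (fun p => (p.1, p.2.items)) := by
    unfold filter_output_wpevt
    rw [pv_fold_lines]
  rw [hA, pv_main, pvCanonD, List.map_map]
  have hB : filter_output_wpevt_alt output
      = (PySem.List.dedup ((pvPairs output).map Prod.fst)).map
          (fun f => (f, pvInner f (pvPairs output))) := rfl
  rw [hB]
  apply List.map_congr_left
  intro f hf
  rfl

-- ===== VERDICT (by name: the statement is the Claim_ definition above) =====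
theorem filter_output_wpevt_spec : Claim_equal_filter_output_wpevt := by
  intro output _ _
  exact pv_equal output
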